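-- pv_equiv track=rewrite | github.com/AldoEZ/CPCFI | Sexta_Generacion_CPCFI/clases/dia1/h.py | solve
-- ===== SOURCE A (Python) =====
-- def solve(n):
--     max = 0
--     poss = 0
--     possf = 0
--     cont = 0
--     for i in n:
--         poss += 1
--         if i == "+":
--             cont += 1
--             if cont >= max:
--                 max = cont
--                 possf = poss
--         else:
--             cont -= 1
--     return possf
-- ===== SOURCE B (Python) =====
-- def solve(n):
--     # two-pass: build all prefix balances, clamp the max at 0, then reverse-scan
--     # for the last '+' position achieving that max
--     bal = []
--     c = 0
--     for ch in n:
--         c += 1 if ch == "+" else -1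
--         bal.append(c)
--     M = max(bal, default=0)
--     if M < 0:
--         M = 0
--     pos = len(bal)
--     for b, ch in zip(reversed(bal), reversed(n)):
--         if b == M and ch == "+":
--             return pos
--         pos -= 1
--     return 0
-- ===== Notes on version B (the rewrite author's own statement) =====
-- stated objective: alternative
-- what changed: A's single loop carrying four mutable variables (running max, position, answer, balance) is split into two independent passes: build the full prefix-balance list, take its 0-clamped maximum, then reverse-scan with early return for the last deposit position achieving that maximum (so ties pick the LAST position, matching A's greater-or-equal update).
import Mathlib
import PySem

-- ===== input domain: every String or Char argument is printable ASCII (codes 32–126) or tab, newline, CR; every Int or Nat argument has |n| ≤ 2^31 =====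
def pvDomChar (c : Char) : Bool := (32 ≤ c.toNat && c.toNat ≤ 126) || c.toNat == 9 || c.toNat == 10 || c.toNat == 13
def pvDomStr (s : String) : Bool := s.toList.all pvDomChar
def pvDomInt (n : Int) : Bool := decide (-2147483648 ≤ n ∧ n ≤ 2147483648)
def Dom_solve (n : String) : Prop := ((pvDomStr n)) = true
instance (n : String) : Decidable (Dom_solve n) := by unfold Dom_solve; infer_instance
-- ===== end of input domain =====

-- B separates A's single stateful loop into two passes: build the full prefix-balance
-- list, then reverse-scan for the last '+' position achieving the 0-clamped maximum
-- (objective: alternative decomposition, exact same result).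


-- ===== PORT A =====
-- state: (max, poss, possf, cont)
def solveStep (s : Int × Int × Int × Int) (i : Char) : Int × Int × Int × Int :=
  let poss := s.2.1 + 1
  if i = '+' then
    let cont := s.2.2.2 + 1
    if cont ≥ s.1 then (cont, poss, poss, cont)
    else (s.1, poss, s.2.2.1, cont)
  else (s.1, poss, s.2.2.1, s.2.2.2 - 1)

def solve (n : String) : Int :=
  (n.toList.foldl solveStep (0, 0, 0, 0)).2.2.1

-- ===== PORT B =====
-- first pass: build the prefix-balance list (and the running balance c)
def balFold (cs : List Char) : List Int × Int :=
  cs.foldl (fun (s : List Int × Int) ch =>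
    let c := s.2 + (if ch = '+' then 1 else -1)
    (s.1 ++ [c], c)) ([], 0)

-- M = max(bal, default=0); if M < 0: M = 0
def clampMax (bal : List Int) : Int :=
  let M0 := match PySem.List.max? bal (fun x => x) with
    | some m => m
    | none => 0
  if M0 < 0 then 0 else M0

-- second pass: 'for b, ch in zip(reversed(bal), reversed(n))' with early return
def revScan : List (Int × Char) → Int → Int → Int
  | [], _, _ => 0
  | (b, ch) :: rest, M, pos =>
    if b = M ∧ ch = '+' then pos else revScan rest M (pos - 1)

def solve_alt (n : String) : Int :=
  let cs := n.toList
  let bal := (balFold cs).1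
  revScan (bal.reverse.zip cs.reverse) (clampMax bal) bal.length

-- ===== PRECONDITION & SPEC =====
def Spec_solve (n : String) (out : Int) : Prop := out = solve_alt n
instance (n : String) (out : Int) : Decidable (Spec_solve n out) := by unfold Spec_solve; infer_instance

-- ===== CLAIM (what is proved, stated in full; the proofs are below) =====
def Claim_equal_solve : Prop := ∀ (n : String), Dom_solve n → Spec_solve n (solve n)

-- ===== LEMMAS AND PROOFS =====

-- max(0, max of the list) as a plain fold: the mathematical form of clampMax
def specM (bal : List Int) : Int := bal.foldl max 0

theorem foldl_max_pull (a : Int) (x : Int) (t : List Int) :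
    t.foldl max (max a x) = max a (t.foldl max x) := by
  induction t generalizing x with
  | nil => rfl
  | cons y t ih => simp only [List.foldl_cons]; rw [max_assoc, ih]

theorem clampMax_eq_specM (bal : List Int) : clampMax bal = specM bal := by
  cases bal with
  | nil => simp [clampMax, specM, PySem.List.max?]
  | cons x t =>
    unfold clampMax
    rw [PySem.List.max?_id_cons]
    simp only [specM, List.foldl_cons]
    have h : t.foldl max (max 0 x) = max 0 (t.foldl max x) := foldl_max_pull 0 x t
    omega

theorem balFold_append (cs : List Char) (ch : Char) :
    balFold (cs ++ [ch]) =
      ((balFold cs).1 ++ [(balFold cs).2 + (if ch = '+' then 1 else -1)],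
       (balFold cs).2 + (if ch = '+' then 1 else -1)) := by
  simp [balFold, List.foldl_append]

theorem balFold_len (cs : List Char) : (balFold cs).1.length = cs.length := by
  induction cs using List.reverseRecOn with
  | nil => simp [balFold]
  | append_singleton cs ch ih => rw [balFold_append]; simp [ih]

theorem specM_append (l : List Int) (b : Int) :
    specM (l ++ [b]) = max (specM l) b := by
  simp [specM, List.foldl_append]

-- B's answer computed on a char list
def bAns (cs : List Char) : Int :=
  revScan ((balFold cs).1.reverse.zip cs.reverse) (specM (balFold cs).1)
    (balFold cs).1.length

-- the loop invariant: A's fold state determined by B's two-pass quantities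
theorem invariant (cs : List Char) :
    cs.foldl solveStep (0, 0, 0, 0) =
      (specM (balFold cs).1, (cs.length : Int), bAns cs, (balFold cs).2) ∧
      (balFold cs).2 ≤ specM (balFold cs).1 ∧ 0 ≤ specM (balFold cs).1 := by
  induction cs using List.reverseRecOn with
  | nil => simp [balFold, specM, bAns, revScan]
  | append_singleton cs ch ih =>
    obtain ⟨hst, hle, h0⟩ := ih
    have hbal := balFold_append cs ch
    have hlen := balFold_len cs
    have hpos : (((balFold cs).1.length + 1 : Nat) : Int) - 1
        = ((balFold cs).1.length : Int) := by push_cast; ring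
    by_cases hch : ch = '+'
    · subst hch
      have hbal' : balFold (cs ++ ['+'])
          = ((balFold cs).1 ++ [(balFold cs).2 + 1], (balFold cs).2 + 1) := by
        rw [hbal]; norm_num
      by_cases hge : (balFold cs).2 + 1 ≥ specM (balFold cs).1
      · -- new maximum (tie included): possf updates to the new position
        have hM' : specM (balFold (cs ++ ['+'])).1 = (balFold cs).2 + 1 := by
          rw [hbal', specM_append]; omega
        have hAns' : bAns (cs ++ ['+']) = (cs.length : Int) + 1 := by
          unfold bAns
          rw [hM', hbal']
          simp only [List.reverse_append, List.reverse_singleton,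
            List.singleton_append, List.zip_cons_cons, List.length_append,
            List.length_singleton, revScan]
          simp [hlen]
        refine ⟨?_, ?_, ?_⟩
        · rw [List.foldl_append, hst]
          simp only [List.foldl_cons, List.foldl_nil, solveStep]
          rw [if_pos trivial, if_pos hge, hAns', hM', hbal']
          simp only [List.length_append, List.length_singleton]
          refine Prod.ext ?_ (Prod.ext ?_ (Prod.ext ?_ ?_)) <;> simp
        · rw [hM', hbal']
        · rw [hM']; omega
      · -- below the running max: only poss/cont move
        have hM' : specM (balFold (cs ++ ['+'])).1 = specM (balFold cs).1 := by
          rw [hbal', specM_append]; omega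
        have hAns' : bAns (cs ++ ['+']) = bAns cs := by
          unfold bAns
          rw [hM', hbal']
          simp only [List.reverse_append, List.reverse_singleton,
            List.singleton_append, List.zip_cons_cons, List.length_append,
            List.length_singleton, revScan]
          split_ifs with h
          · exfalso; omega
          · rw [hpos]
        refine ⟨?_, ?_, ?_⟩
        · rw [List.foldl_append, hst]
          simp only [List.foldl_cons, List.foldl_nil, solveStep]
          rw [if_pos trivial, if_neg (by omega : ¬ (balFold cs).2 + 1 ≥ specM (balFold cs).1),
            hAns', hM', hbal']
          simp only [List.length_append, List.length_singleton]
          refine Prod.ext ?_ (Prod.ext ?_ (Prod.ext ?_ ?_)) <;> simp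
        · rw [hM', hbal']; omega
        · rw [hM']; exact h0
    · -- a non-'+' step: balance drops, max and answer unchanged
      simp only [if_neg hch] at hbal
      have hM' : specM (balFold (cs ++ [ch])).1 = specM (balFold cs).1 := by
        rw [hbal, specM_append]; omega
      have hAns' : bAns (cs ++ [ch]) = bAns cs := by
        unfold bAns
        rw [hM', hbal]
        simp only [List.reverse_append, List.reverse_singleton,
          List.singleton_append, List.zip_cons_cons, List.length_append,
          List.length_singleton, revScan]
        split_ifs with h
        · exact absurd h.2 hch
        · rw [hpos]
      refine ⟨?_, ?_, ?_⟩
      · rw [List.foldl_append, hst]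
        simp only [List.foldl_cons, List.foldl_nil, solveStep, if_neg hch]
        rw [hAns', hM', hbal]
        simp only [List.length_append, List.length_singleton]
        refine Prod.ext ?_ (Prod.ext ?_ (Prod.ext ?_ ?_)) <;> simp
        omega
      · rw [hM', hbal]; omega
      · rw [hM']; exact h0

theorem solve_alt_eq_bAns (n : String) : solve_alt n = bAns n.toList := by
  show revScan ((balFold n.toList).1.reverse.zip n.toList.reverse)
      (clampMax (balFold n.toList).1) ((balFold n.toList).1.length) = _
  rw [clampMax_eq_specM]
  rfl

-- ===== VERDICT (by name: the statement is the Claim_ definition above) =====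
theorem solve_spec : Claim_equal_solve := by
  intro n _
  unfold Spec_solve solve
  rw [(invariant n.toList).1, solve_alt_eq_bAns]
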